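-- pv_equiv track=rewrite | github.com/rpask00/codeforces_py | Chess Cheater.py | calculate
-- ===== SOURCE A (Python) =====
-- def calculate(game):
--     if not game:
--         return 0
--     su = 1 if game[0] == 'W' else 0
--     prev = game[0]
--
--     for g in game[1:]:
--         if g == 'W':
--             su += 2 if prev == 'W' else 1
--             prev = 'W'
--         else:
--             prev = 'L'
--
--     return su
-- ===== SOURCE B (Python) =====
-- def calculate(game):
--     # score = 2*(number of wins) - (number of maximal win streaks)
--     w = sum(1 for g in game if g == 'W')
--     runs = sum(1 for p, g in zip(' ' + game, game) if g == 'W' and p != 'W')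
--     return 2 * w - runs
-- ===== Notes on version B (the rewrite author's own statement) =====
-- stated objective: alternative
-- what changed: Replaces the stateful prev/score single pass with two stateless counts (total wins and number of win-streak starts) combined by the closed form 2*W - streaks.
import Mathlib
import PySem

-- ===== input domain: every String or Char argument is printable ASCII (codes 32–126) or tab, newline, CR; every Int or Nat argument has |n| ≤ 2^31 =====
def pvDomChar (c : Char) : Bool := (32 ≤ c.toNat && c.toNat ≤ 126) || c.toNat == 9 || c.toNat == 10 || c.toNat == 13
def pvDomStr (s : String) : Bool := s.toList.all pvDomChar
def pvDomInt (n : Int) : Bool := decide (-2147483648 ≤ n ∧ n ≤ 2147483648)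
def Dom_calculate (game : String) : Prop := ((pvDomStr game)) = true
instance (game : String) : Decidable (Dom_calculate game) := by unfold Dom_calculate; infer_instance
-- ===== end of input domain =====

-- B replaces A's stateful prev/score scan with two stateless counts combined by 2*W - streaks (objective: alternative).


-- ===== PORT A =====
-- literal port: su starts at 1 iff game[0]='W', prev starts as game[0];
-- the loop over game[1:] adds 2 or 1 on a win depending on prev and normalizes prev to 'W'/'L'.
def calculate (game : String) : Int :=
  match game.toList with
  | [] => 0
  | c :: rest =>
    (rest.foldl
      (fun (st : Int × Char) g =>
        if g = 'W' then (st.1 + (if st.2 = 'W' then 2 else 1), 'W')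
        else (st.1, 'L'))
      ((if c = 'W' then 1 else 0), c)).1

-- ===== PORT B =====
-- literal port of Source B: w = count of 'W'; runs = count of win-streak starts via zip(' '+game, game).
def calculate_alt (game : String) : Int :=
  let l := game.toList
  let w : Int := (l.filter (fun g => g == 'W')).length
  let runs : Int := (((' ' :: l).zip l).filter (fun pg => pg.2 == 'W' && !(pg.1 == 'W'))).length
  2 * w - runs

-- ===== PRECONDITION & SPEC =====
def Spec_calculate (game : String) (out : Int) : Prop := out = calculate_alt game
instance (game : String) (out : Int) : Decidable (Spec_calculate game out) := by unfold Spec_calculate; infer_instance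

-- ===== CLAIM (what is proved, stated in full; the proofs are below) =====
def Claim_equal_calculate : Prop := ∀ (game : String), Dom_calculate game → Spec_calculate game (calculate game)

-- ===== LEMMAS AND PROOFS =====

-- A's per-suffix score given the previous character.
def pvScore : List Char → Char → Int
  | [], _ => 0
  | g :: t, prev =>
    if g = 'W' then (if prev = 'W' then 2 else 1) + pvScore t 'W'
    else pvScore t 'L'

-- count of 'W's as an Int
def pvW (l : List Char) : Int := (l.filter (fun g => g == 'W')).length

-- streak starts in l given previous char p
def pvRuns (p : Char) (l : List Char) : Int :=
  (((p :: l).zip l).filter (fun pg => pg.2 == 'W' && !(pg.1 == 'W'))).length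

theorem pvRuns_cons (p g : Char) (t : List Char) :
    pvRuns p (g :: t) = (if g = 'W' ∧ p ≠ 'W' then 1 else 0) + pvRuns g t := by
  simp only [pvRuns, List.zip_cons_cons, List.filter_cons]
  by_cases hg : g = 'W' <;> by_cases hp : p = 'W' <;>
    simp [hg, hp, Int.add_comm]

theorem pvFoldl_eq_score (l : List Char) (su : Int) (prev : Char) :
    (l.foldl
      (fun (st : Int × Char) g =>
        if g = 'W' then (st.1 + (if st.2 = 'W' then 2 else 1), 'W')
        else (st.1, 'L'))
      (su, prev)).1 = su + pvScore l prev := by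
  induction l generalizing su prev with
  | nil => simp [pvScore]
  | cons g t ih =>
    by_cases hg : g = 'W' <;> simp [pvScore, hg, ih, Int.add_assoc]

theorem pvScore_eq (l : List Char) (p q : Char) (h : (p = 'W') ↔ (q = 'W')) :
    pvScore l p = 2 * pvW l - pvRuns q l := by
  induction l generalizing p q with
  | nil => simp [pvScore, pvW, pvRuns]
  | cons g t ih =>
    rw [pvRuns_cons]
    by_cases hg : g = 'W'
    · have iht := ih 'W' g (by simp [hg])
      by_cases hp : p = 'W'
      · have hq : q = 'W' := h.mp hp
        simp only [pvScore, pvW, hg, hp, hq, if_pos rfl, iht]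
        simp [pvW, List.filter_cons, hg]
        ring
      · have hq : q ≠ 'W' := fun hq => hp (h.mpr hq)
        simp only [pvScore, pvW, hg, if_pos rfl, if_neg hp, iht]
        simp [pvW, List.filter_cons, hg, hq, hp]
        ring
    · have iht := ih 'L' g (by simp [hg])
      simp only [pvScore, hg, if_neg hg, iht]
      simp [pvW, List.filter_cons, hg]

-- ===== VERDICT (by name: the statement is the Claim_ definition above) =====
theorem calculate_spec : Claim_equal_calculate := by
  intro game _
  unfold Spec_calculate calculate calculate_alt
  cases hl : game.toList with
  | nil => simp [hl]
  | cons c rest =>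
    simp only [hl]
    rw [pvFoldl_eq_score]
    have hs := pvScore_eq rest c c Iff.rfl
    show _ = 2 * pvW (c :: rest) - pvRuns ' ' (c :: rest)
    rw [pvRuns_cons, hs]
    by_cases hc : c = 'W' <;> simp [pvW, List.filter_cons, hc] <;> ring
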